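-- pv_equiv track=rewrite | github.com/pjrigali/fantasy_baseball | update_daily_stats_matchup.py | build_matchup_map
-- ===== SOURCE A (Python) =====
-- def build_matchup_map(total_scoring_periods=167, reg_season_matchups=18, playoff_matchups=2):
--     """
--     Build scoring_period->matchup_period mapping.
--
--     Strategy:
--     - Calculate days per regular matchup: floor(total_sp / total_matchups)
--     - Distribute evenly, with any extra days added to the last regular season matchup
--     - Playoff matchups split the remaining days
--
--     Args:
--         total_scoring_periods: Final scoring period (167 for 2025)
--         reg_season_matchups: Number of regular season matchup periods (18)
--         playoff_matchups: Number of playoff matchup periods (2)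
--     """
--     total_matchups = reg_season_matchups + playoff_matchups  # 20
--     days_per_matchup = total_scoring_periods // total_matchups  # 8
--     remainder = total_scoring_periods % total_matchups  # 7
--
--     mp_map = {}
--     sp = 1
--
--     for matchup in range(1, total_matchups + 1):
--         # Base days for this matchup
--         days = days_per_matchup
--         # Distribute remainder across the first N matchups (1 extra day each)
--         if matchup <= remainder:
--             days += 1
--
--         for _ in range(days):
--             if sp <= total_scoring_periods:
--                 mp_map[sp] = matchup
--                 sp += 1
--
--     return mp_map
-- ===== SOURCE B (Python) =====
-- def build_matchup_map(total_scoring_periods=167, reg_season_matchups=18, playoff_matchups=2):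
--     total_matchups = reg_season_matchups + playoff_matchups
--     if total_matchups <= 0:
--         return {}
--     days_per_matchup = total_scoring_periods // total_matchups
--     remainder = total_scoring_periods % total_matchups
--     threshold = remainder * (days_per_matchup + 1)
--     mp_map = {}
--     for sp in range(1, total_scoring_periods + 1):
--         if sp <= threshold:
--             mp_map[sp] = (sp - 1) // (days_per_matchup + 1) + 1
--         else:
--             mp_map[sp] = remainder + (sp - threshold - 1) // days_per_matchup + 1
--     return mp_map
-- ===== Notes on version B (the rewrite author's own statement) =====
-- stated objective: alternative
-- what changed: Replaced A's nested count-out loops over matchups and days (carrying a running scoring-period counter and a per-day dict write with a bounds test) by a single pass over scoring periods that computes each matchup period directly by closed-form floor-division arithmetic (constant-factor win: no inner loop state, no per-day guard).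
import Mathlib
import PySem

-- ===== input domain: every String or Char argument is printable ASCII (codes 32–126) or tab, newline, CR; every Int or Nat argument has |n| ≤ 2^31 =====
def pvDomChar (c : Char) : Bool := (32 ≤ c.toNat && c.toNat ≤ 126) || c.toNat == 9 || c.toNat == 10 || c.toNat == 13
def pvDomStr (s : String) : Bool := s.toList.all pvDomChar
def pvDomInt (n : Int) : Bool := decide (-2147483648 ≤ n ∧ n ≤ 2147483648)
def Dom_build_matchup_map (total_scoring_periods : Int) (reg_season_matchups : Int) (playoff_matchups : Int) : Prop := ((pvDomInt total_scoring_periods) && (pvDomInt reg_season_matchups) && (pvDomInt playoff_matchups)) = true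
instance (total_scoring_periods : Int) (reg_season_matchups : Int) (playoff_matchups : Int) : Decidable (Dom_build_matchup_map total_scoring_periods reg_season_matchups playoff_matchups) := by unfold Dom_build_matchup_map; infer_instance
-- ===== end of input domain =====

-- B replaces A's nested count-out loops by one pass over scoring periods with a closed-form
-- floor-division formula for each matchup period (objective: alternative decomposition, same cost).

-- ===== PORT A =====
def build_matchup_map (total_scoring_periods : Int) (reg_season_matchups : Int) (playoff_matchups : Int) : List (Int × Int) :=
  let total_matchups := reg_season_matchups + playoff_matchups
  let days_per_matchup := PySem.Int.floordiv total_scoring_periods total_matchups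
  let remainder := PySem.Int.mod total_scoring_periods total_matchups
  let res := (PySem.List.pyRange 1 (total_matchups + 1)).foldl
    (fun st matchup =>
      -- days = days_per_matchup; if matchup <= remainder: days += 1
      let days := if matchup ≤ remainder then days_per_matchup + 1 else days_per_matchup
      (PySem.List.pyRange 0 days).foldl
        (fun st _ =>
          if st.2 ≤ total_scoring_periods then (st.1.insert st.2 matchup, st.2 + 1) else st)
        st)
    ((PySem.Dict.empty : PySem.Dict Int Int), (1 : Int))
  res.1.items

-- ===== PORT B =====
def build_matchup_map_alt (total_scoring_periods : Int) (reg_season_matchups : Int) (playoff_matchups : Int) : List (Int × Int) :=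
  let total_matchups := reg_season_matchups + playoff_matchups
  if total_matchups ≤ 0 then (PySem.Dict.empty : PySem.Dict Int Int).items
  else
    let days_per_matchup := PySem.Int.floordiv total_scoring_periods total_matchups
    let remainder := PySem.Int.mod total_scoring_periods total_matchups
    let threshold := remainder * (days_per_matchup + 1)
    ((PySem.List.pyRange 1 (total_scoring_periods + 1)).foldl
      (fun mp_map sp =>
        if sp ≤ threshold then
          mp_map.insert sp (PySem.Int.floordiv (sp - 1) (days_per_matchup + 1) + 1)
        else
          mp_map.insert sp (remainder + PySem.Int.floordiv (sp - threshold - 1) days_per_matchup + 1))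
      (PySem.Dict.empty : PySem.Dict Int Int)).items

-- ===== PRECONDITION & SPEC =====
-- Pre_ excludes exactly reg_season_matchups + playoff_matchups = 0, where A raises ZeroDivisionError
-- (B returns the empty dict there); A returns normally on every other input.
def Pre_build_matchup_map (total_scoring_periods : Int) (reg_season_matchups : Int) (playoff_matchups : Int) : Prop :=
  reg_season_matchups + playoff_matchups ≠ 0
instance (total_scoring_periods : Int) (reg_season_matchups : Int) (playoff_matchups : Int) : Decidable (Pre_build_matchup_map total_scoring_periods reg_season_matchups playoff_matchups) := by unfold Pre_build_matchup_map; infer_instance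

def pvWitness_build_matchup_map : Int × Int × Int := (167, 18, 2)

def Spec_build_matchup_map (total_scoring_periods : Int) (reg_season_matchups : Int) (playoff_matchups : Int) (out : List (Int × Int)) : Prop := out = build_matchup_map_alt total_scoring_periods reg_season_matchups playoff_matchups
instance (total_scoring_periods : Int) (reg_season_matchups : Int) (playoff_matchups : Int) (out : List (Int × Int)) : Decidable (Spec_build_matchup_map total_scoring_periods reg_season_matchups playoff_matchups out) := by unfold Spec_build_matchup_map; infer_instance

-- ===== CLAIM (what is proved, stated in full; the proofs are below) =====
def Claim_equal_build_matchup_map : Prop := ∀ (total_scoring_periods : Int) (reg_season_matchups : Int) (playoff_matchups : Int), Dom_build_matchup_map total_scoring_periods reg_season_matchups playoff_matchups → Pre_build_matchup_map total_scoring_periods reg_season_matchups playoff_matchups → Spec_build_matchup_map total_scoring_periods reg_season_matchups playoff_matchups (build_matchup_map total_scoring_periods reg_season_matchups playoff_matchups)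

-- ===== LEMMAS AND PROOFS =====

-- cumulative number of scoring periods after the first k matchups
def pvS (d rem k : Int) : Int := k * d + min k rem

-- B's per-scoring-period matchup formula
def pvG (d rem j : Int) : Int :=
  if j ≤ rem * (d + 1) then PySem.Int.floordiv (j - 1) (d + 1) + 1
  else rem + PySem.Int.floordiv (j - rem * (d + 1) - 1) d + 1

lemma pv_pyRange_nil (a b : Int) (h : b ≤ a) : PySem.List.pyRange a b = [] := by
  rw [PySem.List.pyRange_one]
  have : (b - a).toNat = 0 := by omega
  simp [this]

lemma pvS_succ (d rem a : Int) (ha : 1 ≤ a) (hr : 0 ≤ rem) :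
    pvS d rem a = pvS d rem (a - 1) + (if a ≤ rem then d + 1 else d) := by
  have h1 : a * d = (a - 1) * d + d := by ring
  unfold pvS
  rcases le_or_gt a rem with h | h
  · rw [if_pos h, min_eq_left h, min_eq_left (by omega)]
    linarith
  · rw [if_neg (by omega), min_eq_right (by omega), min_eq_right (by omega)]
    linarith

lemma pv_gval (m d rem a j : Int) (hm : 0 < m) (hd : 0 ≤ d) (hr0 : 0 ≤ rem) (hrm : rem < m)
    (ha1 : 1 ≤ a) (ham : a ≤ m)
    (hj1 : pvS d rem (a - 1) < j) (hj2 : j ≤ pvS d rem a) : pvG d rem j = a := by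
  unfold pvS at hj1 hj2
  unfold pvG
  rcases le_or_gt a rem with h | h
  · rw [min_eq_left h] at hj2
    rw [min_eq_left (by omega)] at hj1
    have e1 : rem * (d + 1) = rem * d + rem := by ring
    have e2 : (rem - a) * d = rem * d - a * d := by ring
    have e3 : (a - 1) * (d + 1) = (a - 1) * d + (a - 1) := by ring
    have e4 : ((a - 1) + 1) * (d + 1) = a * d + a := by ring
    have hnn : 0 ≤ (rem - a) * d := mul_nonneg (by omega) hd
    rw [if_pos (by linarith)]
    have : PySem.Int.floordiv (j - 1) (d + 1) = a - 1 := by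
      rw [PySem.Int.floordiv_eq_iff_of_pos (by omega)]
      constructor
      · linarith
      · linarith
    rw [this]; ring
  · rw [min_eq_right (by omega)] at hj2
    rw [min_eq_right (by omega)] at hj1
    have e0 : a * d = (a - 1) * d + d := by ring
    have hd1 : 0 < d := by nlinarith
    have e1 : rem * (d + 1) = rem * d + rem := by ring
    have e2 : (a - 1 - rem) * d = (a - 1) * d - rem * d := by ring
    have e3 : ((a - 1 - rem) + 1) * d = a * d - rem * d := by ring
    have hnn : 0 ≤ (a - 1 - rem) * d := mul_nonneg (by omega) (by omega)
    rw [if_neg (by push_neg; linarith)]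
    have : PySem.Int.floordiv (j - rem * (d + 1) - 1) d = a - 1 - rem := by
      rw [PySem.Int.floordiv_eq_iff_of_pos hd1]
      constructor
      · linarith
      · linarith
    rw [this]; ring

lemma pv_inner (N k : Int) : ∀ (l : List Int) (D : PySem.Dict Int Int) (sp : Int),
    sp + l.length ≤ N + 1 →
    l.foldl (fun st _ => if st.2 ≤ N then (st.1.insert st.2 k, st.2 + 1) else st) (D, sp)
      = ((PySem.List.pyRange sp (sp + l.length)).foldl (fun D' j => D'.insert j k) D,
         sp + l.length) := by
  intro l
  induction l with
  | nil =>
    intro D sp _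
    simp [pv_pyRange_nil sp sp le_rfl]
  | cons a l ih =>
    intro D sp hle
    have hlen : ((a :: l).length : Int) = (l.length : Int) + 1 := by push_cast [List.length_cons]; ring
    rw [hlen] at hle ⊢
    have hsp : sp ≤ N := by omega
    rw [List.foldl_cons]
    simp only [hsp, if_pos]
    have := ih (D.insert sp k) (sp + 1) (by omega)
    rw [this]
    rw [PySem.List.pyRange_one_cons (by omega : sp < sp + ((l.length : Int) + 1))]
    rw [List.foldl_cons]
    have h2 : sp + 1 + (l.length : Int) = sp + ((l.length : Int) + 1) := by ring
    rw [h2]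

lemma pv_outer (N m d rem : Int) (hm : 0 < m) (hd : 0 ≤ d) (hr0 : 0 ≤ rem) (hrm : rem < m)
    (hN : N = m * d + rem) :
    ∀ (n : Nat) (a : Int), 1 ≤ a → a ≤ m + 1 → (m + 1 - a).toNat = n →
    ∀ (D : PySem.Dict Int Int),
    (PySem.List.pyRange a (m + 1)).foldl
      (fun st matchup =>
        (PySem.List.pyRange 0 (if matchup ≤ rem then d + 1 else d)).foldl
          (fun st _ => if st.2 ≤ N then (st.1.insert st.2 matchup, st.2 + 1) else st) st)
      (D, pvS d rem (a - 1) + 1)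
      = ((PySem.List.pyRange (pvS d rem (a - 1) + 1) (N + 1)).foldl
          (fun D' j => D'.insert j (pvG d rem j)) D, N + 1) := by
  intro n
  induction n with
  | zero =>
    intro a ha1 ham hn D
    have ha : a = m + 1 := by omega
    subst ha
    have hSm : pvS d rem (m + 1 - 1) = N := by
      unfold pvS
      rw [min_eq_right (by omega)]
      have : (m + 1 - 1) * d = m * d := by ring
      linarith
    rw [pv_pyRange_nil _ _ le_rfl, pv_pyRange_nil _ _ (by omega), List.foldl_nil,
      List.foldl_nil, hSm]
  | succ n ih =>
    intro a ha1 ham hn D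
    have ham' : a ≤ m := by omega
    rw [PySem.List.pyRange_one_cons (by omega : a < m + 1), List.foldl_cons]
    have hdnn : (0:Int) ≤ (if a ≤ rem then d + 1 else d) := by split_ifs <;> omega
    have hlen : ((PySem.List.pyRange 0 (if a ≤ rem then d + 1 else d)).length : Int)
        = (if a ≤ rem then d + 1 else d) := by
      rw [PySem.List.length_pyRange_one]
      omega
    have hSa : pvS d rem a = pvS d rem (a - 1) + (if a ≤ rem then d + 1 else d) :=
      pvS_succ d rem a ha1 hr0
    have hSle : pvS d rem a ≤ N := by
      have h1 : a * d ≤ m * d := mul_le_mul_of_nonneg_right (by omega) hd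
      have h2 : min a rem ≤ rem := min_le_right _ _
      unfold pvS
      linarith
    have hSmono : pvS d rem (a - 1) ≤ pvS d rem a := by linarith
    rw [pv_inner N a _ D (pvS d rem (a - 1) + 1) (by rw [hlen]; linarith), hlen]
    have e2 : pvS d rem (a - 1) + 1 + (if a ≤ rem then d + 1 else d) = pvS d rem a + 1 := by
      linarith
    rw [e2]
    have hcongr : (PySem.List.pyRange (pvS d rem (a - 1) + 1) (pvS d rem a + 1)).foldl
          (fun D' j => D'.insert j a) D
        = (PySem.List.pyRange (pvS d rem (a - 1) + 1) (pvS d rem a + 1)).foldl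
          (fun D' j => D'.insert j (pvG d rem j)) D := by
      apply PySem.List.foldl_congr_mem
      intro acc x hx
      rw [PySem.List.mem_pyRange_one] at hx
      rw [pv_gval m d rem a x hm hd hr0 hrm ha1 ham' (by omega) (by omega)]
    rw [hcongr]
    have ihh := ih (a + 1) (by omega) (by omega) (by omega)
      ((PySem.List.pyRange (pvS d rem (a - 1) + 1) (pvS d rem a + 1)).foldl
        (fun D' j => D'.insert j (pvG d rem j)) D)
    rw [show a + 1 - 1 = a by ring] at ihh
    rw [ihh]
    rw [PySem.List.pyRange_one_append (pvS d rem (a - 1) + 1) (pvS d rem a + 1) (N + 1)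
      (by linarith) (by linarith), List.foldl_append]

-- ===== VERDICT (by name: the statement is the Claim_ definition above) =====
theorem build_matchup_map_spec : Claim_equal_build_matchup_map := by
  intro N r p hDom hPre
  unfold Pre_build_matchup_map at hPre
  unfold Spec_build_matchup_map
  simp only [build_matchup_map, build_matchup_map_alt]
  set m := r + p with hm
  rcases lt_trichotomy m 0 with hneg | hzero | hpos
  · rw [if_pos (by omega), pv_pyRange_nil 1 (m + 1) (by omega), List.foldl_nil]
  · exact absurd hzero hPre
  · rw [if_neg (by omega)]
    set d := PySem.Int.floordiv N m with hdd
    set rem := PySem.Int.mod N m with hrr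
    have hNd : d * m + rem = N := PySem.Int.floordiv_mul_add_mod N m
    have hr0 : 0 ≤ rem := PySem.Int.mod_nonneg N hpos
    have hrm : rem < m := PySem.Int.mod_lt N hpos
    rcases le_or_gt N 0 with hN0 | hN0
    · -- empty result on both sides
      rw [pv_pyRange_nil 1 (N + 1) (by omega), List.foldl_nil]
      have hdle : d ≤ 0 := by
        by_contra hc
        push_neg at hc
        have : m ≤ d * m := by nlinarith
        omega
      have hbody : ∀ (st : PySem.Dict Int Int × Int), ∀ x ∈ PySem.List.pyRange 1 (m + 1),
          (PySem.List.pyRange 0 (if x ≤ rem then d + 1 else d)).foldl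
            (fun st _ => if st.2 ≤ N then (st.1.insert st.2 x, st.2 + 1) else st) st = st := by
        intro st x hx
        rw [PySem.List.mem_pyRange_one] at hx
        have hdays : (if x ≤ rem then d + 1 else d) ≤ 0 := by
          rcases lt_or_eq_of_le hdle with hdlt | hdeq
          · split_ifs <;> omega
          · have hrN : rem = N := by
              have h2 := hNd
              rw [hdeq] at h2
              linarith
            split_ifs with h
            · omega
            · omega
        rw [pv_pyRange_nil 0 _ hdays, List.foldl_nil]
      rw [PySem.List.foldl_congr_mem _ _ (fun st _ => st) _ hbody]
      simp
    · have hd0 : 0 ≤ d := by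
        rw [hdd, PySem.Int.floordiv_eq_ediv_of_pos hpos]
        exact Int.ediv_nonneg (by omega) (by omega)
      have h0 := pv_outer N m d rem hpos hd0 hr0 hrm (by linarith [mul_comm d m])
        (m.toNat) 1 (by omega) (by omega) (by omega) PySem.Dict.empty
      have hS0 : pvS d rem (1 - 1) = 0 := by
        unfold pvS
        rw [show (1:Int) - 1 = 0 by norm_num, min_eq_left hr0]
        ring
      rw [hS0] at h0
      simp only [show (0:Int) + 1 = 1 from by norm_num] at h0
      rw [h0]
      dsimp only
      congr 1
      apply PySem.List.foldl_congr_mem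
      intro acc x hx
      unfold pvG
      split_ifs <;> rfl
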